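-- pv_equiv track=rewrite | github.com/khuushichand/aiml-project | tldw_Server_API/app/core/Collections/reading_service.py | _contains_html_tag
-- ===== SOURCE A (Python) =====
-- def _contains_html_tag(raw: str) -> bool:
--     """Return True when raw includes a tag-like "<a>" sequence."""
--     if not raw:
--         return False
--     tag_started = False
--     length = len(raw)
--     for idx, ch in enumerate(raw):
--         if tag_started:
--             if ch == ">":
--                 return True
--             continue
--         if ch == "<" and idx + 1 < length:
--             next_char = raw[idx + 1]
--             if ("A" <= next_char <= "Z") or ("a" <= next_char <= "z"):
--                 tag_started = True
--     return False
-- ===== SOURCE B (Python) =====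
-- def _contains_html_tag(raw: str) -> bool:
--     """Return True when raw includes a tag-like "<a>" sequence."""
--     if not raw:
--         return False
--     i = raw.find('<')
--     while i != -1:
--         if i + 1 < len(raw) and (('A' <= raw[i + 1] <= 'Z') or ('a' <= raw[i + 1] <= 'z')):
--             # any '>' after the tag-opening letter closes the tag (A's flag scan)
--             return raw.find('>', i + 2) != -1
--         i = raw.find('<', i + 1)
--     return False
-- ===== Notes on version B (the rewrite author's own statement) =====
-- stated objective: idiomatic
-- what changed: Replaces A's per-character tag_started state-machine scan by delimiter jumps: loop over the positions of the opening bracket via str.find, check the following char is an ASCII letter, and answer with a single str.find for the closing bracket past it.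
import Mathlib
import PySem

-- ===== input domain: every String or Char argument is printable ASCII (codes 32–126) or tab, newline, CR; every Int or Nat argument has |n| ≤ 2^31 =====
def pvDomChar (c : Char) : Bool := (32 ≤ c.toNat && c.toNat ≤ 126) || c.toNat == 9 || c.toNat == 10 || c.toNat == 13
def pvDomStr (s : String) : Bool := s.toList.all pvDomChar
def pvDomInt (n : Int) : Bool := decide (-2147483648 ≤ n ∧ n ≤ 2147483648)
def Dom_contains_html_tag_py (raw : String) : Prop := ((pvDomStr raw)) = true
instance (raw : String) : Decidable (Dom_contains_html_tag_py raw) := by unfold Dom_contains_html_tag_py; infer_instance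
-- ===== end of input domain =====

-- B replaces A's per-character tag_started state machine by delimiter jumps with str.find
-- (objective: idiomatic/alternative decomposition; same exact behaviour).

-- ===== PORT A =====
def pvIsAsciiLetter (c : Char) : Bool :=
  ('A' ≤ c && c ≤ 'Z') || ('a' ≤ c && c ≤ 'z')

-- the for-loop of A: state = (idx, tag_started); `next_char = raw[idx+1]` is read as the
-- head of the remaining list (exact: the guard `idx + 1 < length` makes it exactly that char)
def pvALoop (len : Nat) : List Char → Nat → Bool → Bool
  | [], _, _ => false
  | c :: rest, idx, started =>
    if started then
      if c = '>' then true else pvALoop len rest (idx + 1) started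
    else if c = '<' ∧ idx + 1 < len then
      match rest with
      | [] => pvALoop len [] (idx + 1) started           -- unreachable: idx + 1 < len
      | nc :: rest' =>
        if pvIsAsciiLetter nc then pvALoop len (nc :: rest') (idx + 1) true
        else pvALoop len (nc :: rest') (idx + 1) started
    else pvALoop len rest (idx + 1) started

def contains_html_tag_py (raw : String) : Bool :=
  if raw.toList.isEmpty then false
  else pvALoop raw.toList.length raw.toList 0 false

-- ===== PORT B =====
-- B's while loop over i = raw.find('<') / raw.find('<', i+1); fuel is a totality guard only
def pvBLoop (l : List Char) : Int → Nat → Bool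
  | _, 0 => false
  | i, fuel + 1 =>
    if i = -1 then false
    else if i + 1 < (l.length : Int) then
      match PySem.List.pyGet? l (i + 1) with
      | some nc =>
        if pvIsAsciiLetter nc then
          decide (PySem.Chars.findFrom l ['>'] (i + 2) none ≠ -1)
        else pvBLoop l (PySem.Chars.findFrom l ['<'] (i + 1) none) fuel
      | none => pvBLoop l (PySem.Chars.findFrom l ['<'] (i + 1) none) fuel
    else pvBLoop l (PySem.Chars.findFrom l ['<'] (i + 1) none) fuel

def contains_html_tag_py_alt (raw : String) : Bool :=
  let l := raw.toList
  if l.isEmpty then false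
  else pvBLoop l (PySem.Chars.find l ['<']) (l.length + 1)

-- ===== PRECONDITION & SPEC =====
def Spec_contains_html_tag_py (raw : String) (out : Bool) : Prop := out = contains_html_tag_py_alt raw
instance (raw : String) (out : Bool) : Decidable (Spec_contains_html_tag_py raw out) := by unfold Spec_contains_html_tag_py; infer_instance

-- ===== CLAIM (what is proved, stated in full; the proofs are below) =====
def Claim_equal_contains_html_tag_py : Prop := ∀ (raw : String), Dom_contains_html_tag_py raw → Spec_contains_html_tag_py raw (contains_html_tag_py raw)

-- ===== LEMMAS AND PROOFS =====

-- common characterisation: first '<'-followed-by-letter, then membership of '>' past the letter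
def tagP : List Char → Bool
  | [] => false
  | [_] => false
  | c :: nc :: rest =>
    if c = '<' ∧ pvIsAsciiLetter nc then rest.contains '>' else tagP (nc :: rest)

theorem pvIsAsciiLetter_ne_gt {c : Char} (h : pvIsAsciiLetter c = true) : c ≠ '>' := by
  rintro rfl; simp [pvIsAsciiLetter] at h

theorem tagP_cons_ne {c : Char} {t : List Char}
    (h : ¬ (c = '<' ∧ (∀ nc ∈ t.head?, pvIsAsciiLetter nc = true))) :
    tagP (c :: t) = tagP t := by
  cases t with
  | nil => simp [tagP]
  | cons nc rest =>
    show tagP (c :: nc :: rest) = tagP (nc :: rest)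
    rw [tagP]
    rw [if_neg]
    rintro ⟨rfl, hl⟩
    exact h ⟨rfl, by simpa using hl⟩

theorem tagP_no_lt {l : List Char} (h : '<' ∉ l) : tagP l = false := by
  induction l with
  | nil => simp [tagP]
  | cons c t ih =>
    have hc : c ≠ '<' := by rintro rfl; exact h (List.mem_cons_self ..)
    rw [tagP_cons_ne (by rintro ⟨rfl, _⟩; exact hc rfl)]
    exact ih (fun hm => h (List.mem_cons_of_mem _ hm))

theorem prefix_singleton_cons {a c : Char} {t : List Char} :
    [a] <+: (c :: t) ↔ a = c := by
  simp [List.cons_prefix_cons]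

theorem tagP_drop_skip (l : List Char) (k m : Nat) (hkm : k ≤ m) (hm : m ≤ l.length)
    (h : ∀ j, k ≤ j → j < m → ¬ (['<'] <+: l.drop j)) :
    tagP (l.drop k) = tagP (l.drop m) := by
  induction m, hkm using Nat.le_induction with
  | base => rfl
  | succ n hkn ih =>
    have hn : n < l.length := by omega
    rw [ih (by omega) (fun j hj hj' => h j hj (by omega))]
    rw [List.drop_eq_getElem_cons hn]
    rw [tagP_cons_ne]
    rintro ⟨hc, -⟩
    exact h n hkn (by omega) (by
      rw [List.drop_eq_getElem_cons hn, prefix_singleton_cons, hc])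

theorem contains_gt_of_letter {nc : Char} (h : pvIsAsciiLetter nc = true) (rest : List Char) :
    (nc :: rest).contains '>' = rest.contains '>' := by
  have hne := pvIsAsciiLetter_ne_gt h
  simp [Ne.symm hne]

-- A's loop with the flag set scans the remainder for '>'
theorem aloop_true (len : Nat) : ∀ (l : List Char) (idx : Nat),
    pvALoop len l idx true = l.contains '>' := by
  intro l
  induction l with
  | nil => intro idx; simp [pvALoop]
  | cons c rest ih =>
    intro idx
    by_cases hc : c = '>'
    · cases rest <;> simp [pvALoop, hc]
    · cases rest <;> simp [pvALoop, hc, ih, Ne.symm hc]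

theorem aloop_false : ∀ (l : List Char) (idx len : Nat), len = idx + l.length →
    pvALoop len l idx false = tagP l := by
  intro l
  induction l with
  | nil => intro idx len _; simp [pvALoop, tagP]
  | cons c rest ih =>
    intro idx len hlen
    cases rest with
    | nil =>
      have hnl : ¬ (c = '<' ∧ idx + 1 < len) := by
        rintro ⟨-, h2⟩; simp at hlen; omega
      rw [pvALoop, if_neg (Bool.false_ne_true), if_neg hnl,
        ih (idx + 1) len (by simp at hlen ⊢; omega)]
      simp [tagP]
    | cons nc rest' =>
      rw [pvALoop]
      simp only [if_neg (Bool.false_ne_true)]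
      by_cases hcond : c = '<' ∧ idx + 1 < len
      · rw [if_pos hcond]
        by_cases hl : pvIsAsciiLetter nc = true
        · rw [if_pos hl, aloop_true, tagP, if_pos ⟨hcond.1, hl⟩,
            contains_gt_of_letter hl]
        · rw [if_neg hl, ih (idx+1) len (by simp at hlen ⊢; omega), tagP,
            if_neg (by rintro ⟨-, h2⟩; exact hl h2)]
      · rw [if_neg hcond, ih (idx+1) len (by simp at hlen ⊢; omega),
          tagP_cons_ne (c := c) (t := nc :: rest')
            (by rintro ⟨hc, -⟩; exact hcond ⟨hc, by simp at hlen; omega⟩)]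

theorem bloop_eq (l : List Char) : ∀ (fuel k : Nat), k ≤ l.length →
    l.length + 1 - k ≤ fuel →
    pvBLoop l (PySem.Chars.findFrom l ['<'] (k : Int) none) fuel = tagP (l.drop k) := by
  intro fuel
  induction fuel with
  | zero => intro k hk hf; omega
  | succ n ih =>
    intro k hk hf
    by_cases hneg : PySem.Chars.findFrom l ['<'] (k : Int) none = -1
    · rw [hneg, pvBLoop, if_pos rfl]
      have hnin : ¬ (['<'] <:+: l.drop k) :=
        (PySem.Chars.findFrom_natCast_eq_neg_one_iff l ['<'] k hk).mp hneg
      rw [tagP_no_lt (fun hm => hnin ((List.singleton_infix_iff _ _).mpr hm))]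
    · obtain ⟨hki, hpre, hmin⟩ := PySem.Chars.findFrom_natCast_spec l ['<'] k hk hneg
      set i : Int := PySem.Chars.findFrom l ['<'] (k : Int) none with hidef
      have hi0 : 0 ≤ i := le_trans (by exact_mod_cast Nat.zero_le k) hki
      set m : Nat := i.toNat with hmdef
      have him : i = (m : Int) := by omega
      have hmlen : m < l.length := by
        by_contra hge
        rw [List.drop_eq_nil_of_le (by omega)] at hpre
        simp at hpre
      have hdropm : l.drop m = l[m] :: l.drop (m + 1) := List.drop_eq_getElem_cons hmlen
      have hlt : l[m] = '<' := by
        rw [hdropm, prefix_singleton_cons] at hpre; exact hpre.symm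
      have hskip : tagP (l.drop k) = tagP (l.drop m) :=
        tagP_drop_skip l k m (by omega) (by omega)
          (fun j hj hj' => hmin j (by exact_mod_cast hj) (by omega))
      rw [hskip, pvBLoop, if_neg hneg]
      by_cases hrange : i + 1 < (l.length : Int)
      · rw [if_pos hrange]
        have hm1 : m + 1 < l.length := by omega
        have hget : PySem.List.pyGet? l (i + 1) = some l[m + 1] := by
          rw [him]
          have : ((m : Int) + 1) = ((m + 1 : Nat) : Int) := by push_cast; ring
          rw [this, PySem.List.pyGet?_natCast]
          simp [hm1]
        rw [hget]
        dsimp only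
        have hdropm1 : l.drop (m + 1) = l[m + 1] :: l.drop (m + 2) :=
          List.drop_eq_getElem_cons hm1
        by_cases hlet : pvIsAsciiLetter l[m + 1] = true
        · rw [if_pos hlet]
          have hcast : i + 2 = ((m + 2 : Nat) : Int) := by omega
          rw [hcast]
          have hgoal : (PySem.Chars.findFrom l ['>'] ((m + 2 : Nat) : Int) none ≠ -1)
              ↔ '>' ∈ l.drop (m + 2) := by
            rw [← List.singleton_infix_iff]
            constructor
            · intro hne
              by_contra hcon
              exact hne ((PySem.Chars.findFrom_natCast_eq_neg_one_iff l ['>'] (m+2) (by omega)).mpr hcon)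
            · intro hin hne
              exact (PySem.Chars.findFrom_natCast_eq_neg_one_iff l ['>'] (m+2) (by omega)).mp hne hin
          rw [hdropm, hdropm1, tagP, if_pos ⟨hlt, hlet⟩]
          have hcont : (l.drop (m + 2)).contains '>' = decide ('>' ∈ l.drop (m + 2)) := by
            simp
          rw [hcont, decide_eq_decide]
          exact hgoal
        · rw [if_neg hlet]
          have hcast : i + 1 = ((m + 1 : Nat) : Int) := by omega
          rw [hcast, ih (m + 1) (by omega) (by omega)]
          rw [hdropm, hdropm1, tagP, if_neg (by rintro ⟨-, h2⟩; exact hlet h2), ← hdropm1]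
      · rw [if_neg hrange]
        have hm1 : m + 1 = l.length := by omega
        have hcast : i + 1 = ((m + 1 : Nat) : Int) := by omega
        rw [hcast, ih (m + 1) (by omega) (by omega)]
        rw [hdropm, hm1, List.drop_length]
        simp [tagP]

-- ===== VERDICT (by name: the statement is the Claim_ definition above) =====
theorem contains_html_tag_py_spec : Claim_equal_contains_html_tag_py := by
  intro raw _
  show contains_html_tag_py raw = contains_html_tag_py_alt raw
  unfold contains_html_tag_py contains_html_tag_py_alt
  by_cases he : raw.toList.isEmpty
  · simp [he]
  · simp only [he, Bool.false_eq_true, if_false]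
    rw [aloop_false raw.toList 0 raw.toList.length (by omega)]
    have hb := bloop_eq raw.toList (raw.toList.length + 1) 0 (by omega) (by omega)
    rw [Nat.cast_zero, PySem.Chars.findFrom_zero, List.drop_zero] at hb
    exact hb.symm
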